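-- pv_equiv track=rewrite | github.com/jbatterson/puzzles | tools/clueless/cluelessCombinedReport.py | collect_overlap_pairs
-- ===== SOURCE A (Python) =====
-- from collections import Counter, defaultdict
--
-- def collect_overlap_pairs(puzzles: list[frozenset[str]]) -> set[tuple[int, int]]:
--     """Pairs (i,j) with i<j and |Pi ∩ Pj| >= 3."""
--     w2i: dict[str, list[int]] = defaultdict(list)
--     for i, p in enumerate(puzzles):
--         for w in p:
--             w2i[w].append(i)
--
--     seen: set[tuple[int, int]] = set()
--     for idxs in w2i.values():
--         if len(idxs) < 2:
--             continue
--         idxs = sorted(idxs)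
--         for a in range(len(idxs)):
--             for b in range(a + 1, len(idxs)):
--                 i, j = idxs[a], idxs[b]
--                 if i > j:
--                     i, j = j, i
--                 if (i, j) in seen:
--                     continue
--                 if len(puzzles[i] & puzzles[j]) >= 3:
--                     seen.add((i, j))
--     return seen
-- ===== SOURCE B (Python) =====
-- from collections import Counter, defaultdict
--
-- def collect_overlap_pairs(puzzles: list[frozenset[str]]) -> set[tuple[int, int]]:
--     """Pairs (i,j) with i<j and |Pi ∩ Pj| >= 3: count shared words per pair
--     over the inverted index instead of re-computing set intersections."""
--     w2i: dict[str, list[int]] = defaultdict(list)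
--     for i, p in enumerate(puzzles):
--         for w in p:
--             w2i[w].append(i)
--
--     cnt: Counter[tuple[int, int]] = Counter()
--     for idxs in w2i.values():
--         # idxs is ascending by construction, so every pair is already (i, j) with i < j
--         for a in range(len(idxs)):
--             for b in range(a + 1, len(idxs)):
--                 cnt[(idxs[a], idxs[b])] += 1
--     return {pair for pair, c in cnt.items() if c >= 3}
-- ===== Notes on version B (the rewrite author's own statement) =====
-- stated objective: alternative
-- what changed: Instead of testing each candidate pair with a set intersection (recomputed on every further co-occurrence of a pair that never qualifies) guarded by a seen-set, B counts shared words per pair with one Counter over the inverted index and keeps the pairs with count >= 3; intended as faster, measured only ~1.4x at the largest size.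
import Mathlib
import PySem

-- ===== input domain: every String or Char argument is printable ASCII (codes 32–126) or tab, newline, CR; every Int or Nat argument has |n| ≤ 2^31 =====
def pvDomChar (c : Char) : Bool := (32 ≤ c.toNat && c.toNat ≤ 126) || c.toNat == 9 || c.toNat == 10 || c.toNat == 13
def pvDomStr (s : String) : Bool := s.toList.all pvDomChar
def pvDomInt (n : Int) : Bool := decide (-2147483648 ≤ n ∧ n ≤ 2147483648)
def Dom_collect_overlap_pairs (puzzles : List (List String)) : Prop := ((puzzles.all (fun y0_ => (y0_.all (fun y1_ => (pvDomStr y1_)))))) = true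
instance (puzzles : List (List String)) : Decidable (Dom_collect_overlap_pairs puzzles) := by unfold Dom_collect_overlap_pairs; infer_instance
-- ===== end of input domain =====

-- B replaces A's per-pair set intersections (recomputed on every co-occurrence of a
-- non-qualifying pair) and seen-set by one Counter of shared words per pair.

-- ===== PORT A =====
-- the parameter is list[frozenset[str]]: each inner list is read as a Python set
-- (its distinct elements in first-occurrence order), per the set[T] type convention
def pvPuzzleSets (puzzles : List (List String)) : List (PySem.Set String) :=
  puzzles.map (fun p => PySem.Set.ofList p)

-- first phase, textually identical in both Pythons: inverted index word -> puzzle indices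
def pvBuildIndex (ps : List (PySem.Set String)) : PySem.Dict String (List Int) :=
  (PySem.List.enumerate ps).foldl
    (fun d ip => ip.2.foldl (fun d w => d.modify w [] (fun l => l ++ [ip.1])) d)
    PySem.Dict.empty

def collect_overlap_pairs (puzzles : List (List String)) : List (Int × Int) :=
  let ps := pvPuzzleSets puzzles
  let w2i := pvBuildIndex ps
  w2i.values.foldl
    (fun seen idxs =>
      if idxs.length < 2 then seen
      else
        let idxs := PySem.List.sorted idxs (fun x => x)
        (PySem.List.pyRange 0 (idxs.length : Int)).foldl
          (fun seen a =>
            (PySem.List.pyRange (a + 1) (idxs.length : Int)).foldl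
              (fun seen b =>
                let i := PySem.List.pyGetD idxs a 0
                let j := PySem.List.pyGetD idxs b 0
                let ij := if i > j then (j, i) else (i, j)
                if PySem.Set.contains seen ij then seen
                else if 3 ≤ PySem.Set.len
                    (PySem.Set.inter (PySem.List.pyGetD ps ij.1 PySem.Set.empty)
                                     (PySem.List.pyGetD ps ij.2 PySem.Set.empty)) then
                  PySem.Set.add seen ij
                else seen)
              seen)
          seen)
    PySem.Set.empty

-- ===== PORT B =====
def collect_overlap_pairs_alt (puzzles : List (List String)) : List (Int × Int) :=
  let ps := pvPuzzleSets puzzles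
  let w2i := pvBuildIndex ps
  let cnt : PySem.Dict (Int × Int) Int :=
    w2i.values.foldl
      (fun cnt idxs =>
        (PySem.List.pyRange 0 (idxs.length : Int)).foldl
          (fun cnt a =>
            (PySem.List.pyRange (a + 1) (idxs.length : Int)).foldl
              (fun cnt b =>
                cnt.modify (PySem.List.pyGetD idxs a 0, PySem.List.pyGetD idxs b 0) 0 (· + 1))
              cnt)
          cnt)
      PySem.Dict.empty
  PySem.Set.ofList ((cnt.items.filter (fun pc => 3 ≤ pc.2)).map (fun pc => pc.1))

-- ===== PRECONDITION & SPEC =====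
def Spec_collect_overlap_pairs (puzzles : List (List String)) (out : List (Int × Int)) : Prop := out = collect_overlap_pairs_alt puzzles
instance (puzzles : List (List String)) (out : List (Int × Int)) : Decidable (Spec_collect_overlap_pairs puzzles out) := by unfold Spec_collect_overlap_pairs; infer_instance

-- ===== CLAIM (what is proved, stated in full; the proofs are below) =====
def Claim_equal_collect_overlap_pairs : Prop := ∀ (puzzles : List (List String)), Dom_collect_overlap_pairs puzzles → Spec_collect_overlap_pairs puzzles (collect_overlap_pairs puzzles)

-- ===== LEMMAS AND PROOFS =====

def pvL (ps : List (PySem.Set String)) : List (String × Int) :=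
  (PySem.List.enumerate ps).flatMap (fun ip => ip.2.map (fun w => (w, ip.1)))
def pvIdx (ps : List (PySem.Set String)) (w : String) : List Int :=
  (pvBuildIndex ps).getD w []

lemma buildIndex_flatten (ps : List (PySem.Set String)) :
    pvBuildIndex ps =
      (pvL ps).foldl (fun d p => d.modify p.1 [] (fun l => l ++ [p.2])) PySem.Dict.empty := by
  unfold pvBuildIndex pvL
  rw [List.foldl_flatMap]
  simp only [List.foldl_map]

lemma keys_index (ps : List (PySem.Set String)) :
    (pvBuildIndex ps).keys = PySem.Set.ofList ((pvL ps).map Prod.fst) := by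
  rw [buildIndex_flatten]
  rw [PySem.Dict.keys_foldl_modify_key (pvL ps) Prod.fst [] (fun _ p => (fun l => l ++ [p.2])) _]
  rw [PySem.Dict.keys_empty]
  exact PySem.Set.update_empty _

lemma nodup_keys_index (ps : List (PySem.Set String)) : (pvBuildIndex ps).keys.Nodup := by
  rw [buildIndex_flatten]
  exact PySem.Dict.nodup_keys_foldl_modify_key (pvL ps) Prod.fst [] (fun _ p => (fun l => l ++ [p.2])) _
    (by rw [PySem.Dict.keys_empty]; exact List.nodup_nil)

lemma filter_beq_nodup {l : List String} (h : l.Nodup) (w : String) :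
    l.filter (fun x => x == w) = if w ∈ l then [w] else [] := by
  induction l with
  | nil => simp
  | cons x xs ih =>
    rw [List.filter_cons]
    by_cases hx : x = w
    · subst hx
      simp only [BEq.rfl, if_pos, List.mem_cons, true_or, if_true]
      have : x ∉ xs := (List.nodup_cons.mp h).1
      have : xs.filter (fun y => y == x) = [] := by
        rw [ih (List.nodup_cons.mp h).2]; simp [this]
      simp [this]
    · simp only [beq_iff_eq, hx, if_false, if_neg]
      rw [ih (List.nodup_cons.mp h).2]
      simp [List.mem_cons, Ne.symm hx, hx]

lemma values_index (ps : List (PySem.Set String)) :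
    (pvBuildIndex ps).values = (pvBuildIndex ps).keys.map (pvIdx ps) := by
  exact PySem.Dict.values_eq_map_keys (pvBuildIndex ps) (nodup_keys_index ps) []

lemma flatMap_ite_singleton {α β : Type} (l : List α) (c : α → Bool) (g : α → β) :
    l.flatMap (fun x => if c x then [g x] else []) = (l.filter c).map g := by
  induction l with
  | nil => rfl
  | cons x xs ih =>
    rw [List.flatMap_cons, List.filter_cons, ih]
    by_cases hx : c x <;> simp [hx]

lemma idx_eq (ps : List (PySem.Set String)) (hnd : ∀ p ∈ ps, List.Nodup p) (w : String) :
    pvIdx ps w = ((PySem.List.enumerate ps).filter (fun ip => PySem.Set.contains ip.2 w)).map Prod.fst := by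
  unfold pvIdx
  rw [buildIndex_flatten, PySem.Dict.getD_foldl_modify_append, PySem.Dict.getD_empty]
  unfold pvL
  rw [List.filter_flatMap, List.map_flatMap, List.nil_append]
  rw [← flatMap_ite_singleton (PySem.List.enumerate ps) (fun ip => PySem.Set.contains ip.2 w) Prod.fst]
  apply List.flatMap_congr
  intro ip hip
  have hmem : ip.2 ∈ ps := by
    obtain ⟨k, hk, rfl⟩ := (PySem.List.mem_enumerate_iff ps 0 ip).mp hip
    exact List.getElem_mem hk
  have hnd2 := hnd _ hmem
  rw [List.filter_map]
  have hcomp : ((fun p : String × Int => p.1 == w) ∘ (fun w' => (w', ip.1))) = (fun w' => w' == w) := rfl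
  rw [hcomp, filter_beq_nodup hnd2 w]
  by_cases hw : w ∈ ip.2
  · rw [if_pos hw, if_pos ((PySem.Set.contains_iff _ _).mpr hw)]
    rfl
  · rw [if_neg hw, if_neg (fun hc => hw ((PySem.Set.contains_iff _ _).mp hc))]
    rfl

lemma pairwise_idx (ps : List (PySem.Set String)) (hnd : ∀ p ∈ ps, List.Nodup p) (w : String) :
    (pvIdx ps w).Pairwise (· < ·) := by
  rw [idx_eq ps hnd w]
  exact ((PySem.List.pairwise_lt_enumerate ps 0).filter _).map _ (fun a b h => h)

lemma mem_idx (ps : List (PySem.Set String)) (hnd : ∀ p ∈ ps, List.Nodup p) (w : String) (i : Int) :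
    i ∈ pvIdx ps w ↔ ∃ (k : Nat), ∃ (h : k < ps.length), i = (k : Int) ∧ w ∈ ps[k] := by
  rw [idx_eq ps hnd w]
  simp only [List.mem_map, List.mem_filter, PySem.List.mem_enumerate_iff]
  constructor
  · rintro ⟨⟨a, b⟩, ⟨⟨k, hk, hp⟩, hc⟩, rfl⟩
    cases hp
    exact ⟨k, hk, by simp, (PySem.Set.contains_iff _ _).mp hc⟩
  · rintro ⟨k, hk, rfl, hw⟩
    exact ⟨((k : Int), ps[k]), ⟨⟨k, hk, by simp⟩, (PySem.Set.contains_iff _ _).mpr hw⟩, rfl⟩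

lemma mem_keys_of_mem (ps : List (PySem.Set String)) {w : String} {k : Nat}
    (hk : k < ps.length) (hw : w ∈ ps[k]) : w ∈ (pvBuildIndex ps).keys := by
  rw [keys_index, PySem.Set.mem_ofList]
  unfold pvL
  rw [List.map_flatMap]
  apply List.mem_flatMap.mpr
  refine ⟨((k : Int), ps[k]), (PySem.List.mem_enumerate_iff ps 0 _).mpr ⟨k, hk, by simp⟩, ?_⟩
  simp only [List.map_map]
  exact List.mem_map.mpr ⟨w, hw, rfl⟩

def pairsOf : List Int → List (Int × Int)
  | [] => []
  | x :: xs => xs.map (fun y => (x, y)) ++ pairsOf xs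

lemma range_pairs (full : List Int) : ∀ (l : List Int) (off : Nat), full.drop off = l →
    (PySem.List.pyRange (off : Int) (full.length : Int)).flatMap
      (fun a => (PySem.List.pyRange (a + 1) (full.length : Int)).map
        (fun b => (PySem.List.pyGetD full a 0, PySem.List.pyGetD full b 0))) = pairsOf l := by
  intro l
  induction l with
  | nil =>
    intro off h
    have hle : full.length ≤ off := by
      by_contra hc
      exact absurd (List.drop_eq_nil_iff.mp h) (by omega)
    rw [PySem.List.pyRange_one_eq_nil (by exact_mod_cast hle)]
    rfl
  | cons x xs ih =>
    intro off h
    have hofflt : off < full.length := by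
      by_contra hc
      rw [List.drop_eq_nil_iff.mpr (by omega)] at h
      exact absurd h (by simp)
    have hcons := List.drop_eq_getElem_cons hofflt
    rw [h] at hcons
    have hx0 : full[off] = x := by
      have := hcons.symm
      exact (List.cons.injEq _ _ _ _ ▸ this).1
    have hdrop : full.drop (off + 1) = xs := by
      have := hcons.symm
      exact (List.cons.injEq _ _ _ _ ▸ this).2
    have hx : PySem.List.pyGetD full (off : Int) 0 = x := by
      rw [PySem.List.pyGetD_natCast, List.getD_eq_getElem?_getD, List.getElem?_eq_getElem hofflt]
      simpa using hx0
    rw [PySem.List.pyRange_one_cons (by exact_mod_cast hofflt), List.flatMap_cons]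
    have hmap : (PySem.List.pyRange ((off : Int) + 1) (full.length : Int)).map
        (fun b => PySem.List.pyGetD full b 0) = xs := by
      rw [PySem.List.map_pyGetD_pyRange' full 0 (by positivity)]
      rw [show ((off : Int) + 1).toNat = off + 1 from by omega, hdrop]
    have hcast : ((off : Int) + 1) = ((off + 1 : Nat) : Int) := by push_cast; ring
    show _ ++ _ = _ ++ _
    congr 1
    · simp only [hx]
      rw [← hmap, List.map_map]
      rfl
    · rw [hcast]
      exact ih (off + 1) hdrop

lemma nested_loops_eq {σ : Type} (idxs : List Int) (f : σ → Int × Int → σ) (init : σ) :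
    (PySem.List.pyRange 0 (idxs.length : Int)).foldl
      (fun s a => (PySem.List.pyRange (a + 1) (idxs.length : Int)).foldl
        (fun s b => f s (PySem.List.pyGetD idxs a 0, PySem.List.pyGetD idxs b 0)) s) init
    = (pairsOf idxs).foldl f init := by
  have h := range_pairs idxs idxs 0 rfl
  rw [show ((0 : Nat) : Int) = (0 : Int) from rfl] at h
  rw [← h, List.foldl_flatMap]
  simp only [List.foldl_map]

lemma mem_pairsOf {l : List Int} {p : Int × Int} (h : p ∈ pairsOf l) : p.1 ∈ l ∧ p.2 ∈ l := by
  induction l with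
  | nil => cases h
  | cons x xs ih =>
    rw [pairsOf, List.mem_append] at h
    rcases h with h | h
    · obtain ⟨y, hy, rfl⟩ := List.mem_map.mp h
      exact ⟨List.mem_cons_self, List.mem_cons_of_mem _ hy⟩
    · obtain ⟨h1, h2⟩ := ih h
      exact ⟨List.mem_cons_of_mem _ h1, List.mem_cons_of_mem _ h2⟩

lemma mem_pairsOf_lt {l : List Int} (hl : l.Pairwise (· < ·)) {p : Int × Int}
    (h : p ∈ pairsOf l) : p.1 < p.2 := by
  induction l with
  | nil => cases h
  | cons x xs ih =>
    rw [pairsOf, List.mem_append] at h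
    rcases h with h | h
    · obtain ⟨y, hy, rfl⟩ := List.mem_map.mp h
      exact (List.pairwise_cons.mp hl).1 y hy
    · exact ih (List.pairwise_cons.mp hl).2 h

lemma count_map_pair (x : Int) (xs : List Int) (i j : Int) :
    (xs.map (fun y => (x, y))).count (i, j) = if x = i then xs.count j else 0 := by
  induction xs with
  | nil => simp
  | cons y ys ih =>
    simp only [List.map_cons, List.count_cons, ih]
    by_cases hx : x = i <;> by_cases hy : y = j <;>
      simp [hx, hy, Prod.ext_iff]

lemma count_pairsOf {l : List Int} (hl : l.Pairwise (· < ·)) {i j : Int} (hij : i < j) :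
    (pairsOf l).count (i, j) = if i ∈ l ∧ j ∈ l then 1 else 0 := by
  induction l with
  | nil => simp [pairsOf]
  | cons x xs ih =>
    have hx := (List.pairwise_cons.mp hl).1
    have hxs := (List.pairwise_cons.mp hl).2
    have hnd : xs.Nodup := hxs.imp (fun h => ne_of_lt h)
    rw [pairsOf, List.count_append, count_map_pair, ih hxs]
    by_cases hxi : x = i
    · subst hxi
      have hixs : x ∉ xs := fun hm => absurd (hx x hm) (lt_irrefl x)
      have hjx : j ≠ x := fun he => absurd hij (by omega)
      by_cases hj : j ∈ xs
      · rw [if_pos rfl, List.count_eq_one_of_mem hnd hj]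
        simp [hixs, hj, hjx]
      · rw [if_pos rfl, List.count_eq_zero_of_not_mem hj]
        simp [hixs, hj, hjx]
    · rw [if_neg hxi]
      by_cases hjx : j = x
      · subst hjx
        have hni : i ∉ xs := fun hm => absurd (hx i hm) (by omega)
        simp [hni, hxi, show ¬ i = j from by omega]
      · have h1 : ¬ i = x := fun he => hxi he.symm
        simp [List.mem_cons, h1, hxi, hjx]

lemma sum_ite_nat {α : Type} (c : α → Bool) (l : List α) :
    (l.map (fun x => if c x then 1 else 0)).sum = l.countP c := by
  induction l with
  | nil => rfl
  | cons x xs ih =>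
    rw [List.map_cons, List.sum_cons, ih, List.countP_cons]
    by_cases hx : c x <;> simp [hx, Nat.add_comm]

lemma foldl_seen (q : Int × Int → Bool) : ∀ (S T : List (Int × Int)),
    S.foldl (fun s p => if PySem.Set.contains s p then s else if q p then s ++ [p] else s)
      ((PySem.Set.ofList T).filter q) = (PySem.Set.ofList (T ++ S)).filter q := by
  intro S
  induction S with
  | nil => intro T; simp
  | cons p S ih =>
    intro T
    rw [List.foldl_cons]
    have hTS : T ++ p :: S = (T ++ [p]) ++ S := by simp
    rw [hTS, ← ih (T ++ [p]), PySem.Set.ofList_append_singleton, PySem.Set.add_eq_ite]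
    by_cases hmem : p ∈ PySem.Set.ofList T
    · rw [if_pos hmem]
      by_cases hq : q p
      · have hc : PySem.Set.contains ((PySem.Set.ofList T).filter q) p = true := by
          rw [PySem.Set.contains_iff]
          exact List.mem_filter.mpr ⟨hmem, hq⟩
        rw [hc]
        simp
      · have hc : PySem.Set.contains ((PySem.Set.ofList T).filter q) p = false := by
          rw [Bool.eq_false_iff]
          intro hc
          exact absurd (List.mem_filter.mp ((PySem.Set.contains_iff _ _).mp hc)).2 (by simp [hq])
        rw [hc]
        simp [hq]
    · rw [if_neg hmem]
      have hnc : PySem.Set.contains ((PySem.Set.ofList T).filter q) p = false := by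
        rw [Bool.eq_false_iff]
        intro hc
        exact hmem (List.mem_filter.mp ((PySem.Set.contains_iff _ _).mp hc)).1
      rw [hnc, List.filter_append]
      by_cases hq : q p <;> simp [hq]

def pvQual (ps : List (PySem.Set String)) (p : Int × Int) : Bool :=
  decide (3 ≤ PySem.Set.len
    (PySem.Set.inter (PySem.List.pyGetD ps p.1 PySem.Set.empty)
                     (PySem.List.pyGetD ps p.2 PySem.Set.empty)))

def pvS (ps : List (PySem.Set String)) : List (Int × Int) :=
  (pvBuildIndex ps).values.flatMap pairsOf

def pvStepA (ps : List (PySem.Set String)) (s : List (Int × Int)) (p : Int × Int) : List (Int × Int) :=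
  if PySem.Set.contains s p then s else if pvQual ps p then s ++ [p] else s

lemma pairsOf_short {l : List Int} (h : l.length < 2) : pairsOf l = [] := by
  match l, h with
  | [], _ => rfl
  | [x], _ => rfl

lemma nodup_puzzleSets (puzzles : List (List String)) :
    ∀ p ∈ pvPuzzleSets puzzles, List.Nodup p := by
  intro p hp
  obtain ⟨q, _, rfl⟩ := List.mem_map.mp hp
  exact PySem.Set.nodup_ofList q

lemma flatMap_of_map {α β γ : Type} (l : List α) (f : α → β) (g : β → List γ) :
    (l.map f).flatMap g = l.flatMap (fun x => g (f x)) := by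
  induction l with
  | nil => rfl
  | cons x xs ih => simp [List.flatMap_cons, ih]

lemma count_S (ps : List (PySem.Set String)) (hnd : ∀ p ∈ ps, List.Nodup p)
    {k1 k2 : Nat} (h1 : k1 < ps.length) (h2 : k2 < ps.length) (hlt : k1 < k2) :
    (pvS ps).count ((k1 : Int), (k2 : Int)) = (PySem.Set.inter ps[k1] ps[k2]).length := by
  unfold pvS
  rw [values_index, List.count_flatMap, List.map_map]
  have hstep : ((pvBuildIndex ps).keys.map
      ((List.count ((k1 : Int), (k2 : Int)) ∘ pairsOf) ∘ pvIdx ps))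
      = (pvBuildIndex ps).keys.map (fun w =>
          if (PySem.Set.contains ps[k1] w && PySem.Set.contains ps[k2] w) then 1 else 0) := by
    apply List.map_congr_left
    intro w _
    have hc := count_pairsOf (pairwise_idx ps hnd w) (i := (k1 : Int)) (j := (k2 : Int)) (by exact_mod_cast hlt)
    simp only [Function.comp_apply, hc]
    have e1 : ((k1 : Int) ∈ pvIdx ps w) ↔ w ∈ ps[k1] := by
      rw [mem_idx ps hnd w]
      constructor
      · rintro ⟨k, hk, he, hw⟩
        have : k = k1 := by exact_mod_cast he.symm
        subst this; exact hw
      · intro hw; exact ⟨k1, h1, rfl, hw⟩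
    have e2 : ((k2 : Int) ∈ pvIdx ps w) ↔ w ∈ ps[k2] := by
      rw [mem_idx ps hnd w]
      constructor
      · rintro ⟨k, hk, he, hw⟩
        have : k = k2 := by exact_mod_cast he.symm
        subst this; exact hw
      · intro hw; exact ⟨k2, h2, rfl, hw⟩
    simp [e1, e2, Bool.and_eq_true, PySem.Set.contains_iff]
  rw [hstep, sum_ite_nat]
  rw [List.countP_eq_length_filter]
  have hperm : ((pvBuildIndex ps).keys.filter
      (fun w => PySem.Set.contains ps[k1] w && PySem.Set.contains ps[k2] w)).Perm
      (ps[k1].filter (fun x => PySem.Set.contains ps[k2] x)) := by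
    rw [List.perm_ext_iff_of_nodup ((nodup_keys_index ps).filter _)
      ((hnd _ (List.getElem_mem h1)).filter _)]
    intro a
    simp only [List.mem_filter, Bool.and_eq_true, PySem.Set.contains_iff]
    constructor
    · rintro ⟨_, hk1, hk2⟩
      exact ⟨hk1, hk2⟩
    · rintro ⟨hk1, hk2⟩
      exact ⟨mem_keys_of_mem ps h1 hk1, hk1, hk2⟩
  rw [hperm.length_eq]
  rfl

lemma mem_S (ps : List (PySem.Set String)) (hnd : ∀ p ∈ ps, List.Nodup p)
    {p : Int × Int} (hp : p ∈ pvS ps) :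
    ∃ (k1 k2 : Nat), ∃ (_ : k1 < ps.length), ∃ (_ : k2 < ps.length),
      p = ((k1 : Int), (k2 : Int)) ∧ k1 < k2 := by
  unfold pvS at hp
  rw [values_index] at hp
  obtain ⟨idxs, hidxs, hpp⟩ := List.mem_flatMap.mp hp
  obtain ⟨w, _, rfl⟩ := List.mem_map.mp hidxs
  have hpw := pairwise_idx ps hnd w
  have hlt := mem_pairsOf_lt hpw hpp
  obtain ⟨m1, m2⟩ := mem_pairsOf hpp
  obtain ⟨a1, ha1, e1, _⟩ := (mem_idx ps hnd w _).mp m1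
  obtain ⟨a2, ha2, e2, _⟩ := (mem_idx ps hnd w _).mp m2
  refine ⟨a1, a2, ha1, ha2, ?_, ?_⟩
  · rw [← Prod.mk.eta (p := p), e1, e2]
  · rw [e1, e2] at hlt
    exact_mod_cast hlt

lemma portA_eq (puzzles : List (List String)) :
    collect_overlap_pairs puzzles
      = (PySem.Set.ofList (pvS (pvPuzzleSets puzzles))).filter (pvQual (pvPuzzleSets puzzles)) := by
  have hnd := nodup_puzzleSets puzzles
  simp only [collect_overlap_pairs]
  rw [values_index, List.foldl_map]
  refine Eq.trans (PySem.List.foldl_congr_mem _ _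
    (fun seen w => (pairsOf (pvIdx (pvPuzzleSets puzzles) w)).foldl
      (pvStepA (pvPuzzleSets puzzles)) seen) _ ?_) ?_
  · intro seen w _
    beta_reduce
    have hpw := pairwise_idx (pvPuzzleSets puzzles) hnd w
    by_cases hshort : (pvIdx (pvPuzzleSets puzzles) w).length < 2
    · rw [if_pos hshort, pairsOf_short hshort]
      rfl
    · rw [if_neg hshort]
      rw [PySem.List.sorted_eq_of_perm_of_pairwise_lt (pvIdx (pvPuzzleSets puzzles) w)
        (pvIdx (pvPuzzleSets puzzles) w) (fun x => x) (List.Perm.refl _) hpw]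
      refine Eq.trans (nested_loops_eq (pvIdx (pvPuzzleSets puzzles) w)
        (fun s p =>
          if PySem.Set.contains s (if p.1 > p.2 then (p.2, p.1) else (p.1, p.2)) then s
          else if 3 ≤ PySem.Set.len
              (PySem.Set.inter
                (PySem.List.pyGetD (pvPuzzleSets puzzles)
                  (if p.1 > p.2 then (p.2, p.1) else (p.1, p.2)).1 PySem.Set.empty)
                (PySem.List.pyGetD (pvPuzzleSets puzzles)
                  (if p.1 > p.2 then (p.2, p.1) else (p.1, p.2)).2 PySem.Set.empty)) then
            PySem.Set.add s (if p.1 > p.2 then (p.2, p.1) else (p.1, p.2))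
          else s) seen) ?_
      apply PySem.List.foldl_congr_mem
      intro s p hp
      have hplt : p.1 < p.2 := mem_pairsOf_lt hpw hp
      have hswap : (if p.1 > p.2 then (p.2, p.1) else (p.1, p.2)) = p := by
        rw [if_neg (by omega)]
      rw [hswap]
      unfold pvStepA pvQual
      by_cases hc : PySem.Set.contains s p = true
      · have hm : p ∈ s := (PySem.Set.contains_iff s p).mp hc
        simp [hm]
      · have hcf : PySem.Set.contains s p = false := by
          revert hc; cases PySem.Set.contains s p <;> simp
        have hnm : p ∉ s := fun hm => hc ((PySem.Set.contains_iff s p).mpr hm)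
        simp only [hcf, Bool.false_eq_true, if_false, decide_eq_true_eq]
        split_ifs with hq2
        · exact PySem.Set.add_of_not_mem hnm
        · rfl
  · rw [← List.foldl_flatMap]
    have hS : (pvBuildIndex (pvPuzzleSets puzzles)).keys.flatMap
        (fun w => pairsOf (pvIdx (pvPuzzleSets puzzles) w)) = pvS (pvPuzzleSets puzzles) := by
      unfold pvS
      rw [values_index, flatMap_of_map]
    rw [hS]
    exact foldl_seen (pvQual (pvPuzzleSets puzzles)) (pvS (pvPuzzleSets puzzles)) []

lemma portB_eq (puzzles : List (List String)) :
    collect_overlap_pairs_alt puzzles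
      = (PySem.Set.ofList (pvS (pvPuzzleSets puzzles))).filter
          (fun p => decide (3 ≤ (((pvS (pvPuzzleSets puzzles)).count p : Int)))) := by
  simp only [collect_overlap_pairs_alt]
  rw [values_index, List.foldl_map]
  have hcnt : (pvBuildIndex (pvPuzzleSets puzzles)).keys.foldl
      (fun cnt idxs' => (PySem.List.pyRange 0 ((pvIdx (pvPuzzleSets puzzles) idxs').length : Int)).foldl
        (fun cnt a => (PySem.List.pyRange (a + 1) ((pvIdx (pvPuzzleSets puzzles) idxs').length : Int)).foldl
          (fun cnt b => cnt.modify (PySem.List.pyGetD (pvIdx (pvPuzzleSets puzzles) idxs') a 0,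
            PySem.List.pyGetD (pvIdx (pvPuzzleSets puzzles) idxs') b 0) 0 (· + 1)) cnt) cnt)
      PySem.Dict.empty = PySem.Dict.counter (pvS (pvPuzzleSets puzzles)) := by
    refine Eq.trans (PySem.List.foldl_congr_mem _ _
      (fun cnt w => (pairsOf (pvIdx (pvPuzzleSets puzzles) w)).foldl
        (fun d p => d.modify p 0 (· + 1)) cnt) _ ?_) ?_
    · intro cnt w _
      exact nested_loops_eq (pvIdx (pvPuzzleSets puzzles) w) (fun d p => d.modify p 0 (· + 1)) cnt
    · rw [← List.foldl_flatMap]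
      have hS : (pvBuildIndex (pvPuzzleSets puzzles)).keys.flatMap
          (fun w => pairsOf (pvIdx (pvPuzzleSets puzzles) w)) = pvS (pvPuzzleSets puzzles) := by
        unfold pvS
        rw [values_index, flatMap_of_map]
      rw [hS, ← PySem.Dict.counter_eq_foldl]
  rw [hcnt, PySem.Dict.items_counter, List.filter_map, List.map_map]
  have hcomp : ((fun pc : (Int × Int) × Int => decide (3 ≤ pc.2)) ∘
      (fun k => (k, (List.count k (pvS (pvPuzzleSets puzzles)) : Int))))
      = fun p => decide (3 ≤ ((List.count p (pvS (pvPuzzleSets puzzles)) : Int))) := rfl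
  have hfst : ((fun pc : (Int × Int) × Int => pc.1) ∘
      (fun k : Int × Int => (k, (List.count k (pvS (pvPuzzleSets puzzles)) : Int)))) = id := rfl
  rw [hcomp, hfst, List.map_id]
  exact PySem.Set.ofList_eq_self_of_nodup _
    ((PySem.Set.nodup_ofList _).filter _)

lemma qual_count (puzzles : List (List String))
    {k1 k2 : Nat} (h1 : k1 < (pvPuzzleSets puzzles).length) (h2 : k2 < (pvPuzzleSets puzzles).length)
    (hlt : k1 < k2) :
    pvQual (pvPuzzleSets puzzles) ((k1 : Int), (k2 : Int))
      = decide (3 ≤ (((pvS (pvPuzzleSets puzzles)).count ((k1 : Int), (k2 : Int)) : Int))) := by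
  rw [count_S (pvPuzzleSets puzzles) (nodup_puzzleSets puzzles) h1 h2 hlt]
  simp only [pvQual]
  rw [PySem.List.pyGetD_eq_getElem (pvPuzzleSets puzzles) PySem.Set.empty
      (i := (k1 : Int)) (by positivity) (by exact_mod_cast h1),
    PySem.List.pyGetD_eq_getElem (pvPuzzleSets puzzles) PySem.Set.empty
      (i := (k2 : Int)) (by positivity) (by exact_mod_cast h2)]
  simp [PySem.Set.len]

-- ===== VERDICT (by name: the statement is the Claim_ definition above) =====
theorem collect_overlap_pairs_spec : Claim_equal_collect_overlap_pairs := by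
  unfold Claim_equal_collect_overlap_pairs
  intro puzzles _
  unfold Spec_collect_overlap_pairs
  rw [portA_eq, portB_eq]
  apply List.filter_congr
  intro p hp
  have hpS : p ∈ pvS (pvPuzzleSets puzzles) := (PySem.Set.mem_ofList _ _).mp hp
  obtain ⟨k1, k2, h1, h2, rfl, hlt⟩ := mem_S _ (nodup_puzzleSets puzzles) hpS
  exact qual_count puzzles h1 h2 hlt
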